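-- pv_equiv track=rewrite | github.com/bryansmobiledetailing-star/math-sdk | games/meta_vault/test_config.py | analyze_h1_stacks
-- ===== SOURCE A (Python) =====
-- def analyze_h1_stacks(reel):
--     """Find maximum consecutive H1 symbols in a reel."""
--     max_stack = 0
--     current_stack = 0
--     for symbol in reel:
--         if symbol == 'H1':
--             current_stack += 1
--             max_stack = max(max_stack, current_stack)
--         else:
--             current_stack = 0
--     return max_stack
-- ===== SOURCE B (Python) =====
-- def _runs(reel):
--     """Yield (symbol, run_length) for each maximal run of equal symbols."""
--     i, n = 0, len(reel)
--     while i < n: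
--         j = i
--         while j < n and reel[j] == reel[i]:
--             j += 1
--         yield reel[i], j - i
--         i = j
--
-- def analyze_h1_stacks(reel):
--     """Find maximum consecutive H1 symbols in a reel."""
--     return max((length for sym, length in _runs(reel) if sym == 'H1'), default=0)
-- ===== Notes on version B (the rewrite author's own statement) =====
-- stated objective: idiomatic
-- what changed: Replaces the reset-accumulator loop by a run-length decomposition: the reel is split into maximal runs of equal symbols and the answer is the max (default 0) over the lengths of the H1 runs.
import Mathlib
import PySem

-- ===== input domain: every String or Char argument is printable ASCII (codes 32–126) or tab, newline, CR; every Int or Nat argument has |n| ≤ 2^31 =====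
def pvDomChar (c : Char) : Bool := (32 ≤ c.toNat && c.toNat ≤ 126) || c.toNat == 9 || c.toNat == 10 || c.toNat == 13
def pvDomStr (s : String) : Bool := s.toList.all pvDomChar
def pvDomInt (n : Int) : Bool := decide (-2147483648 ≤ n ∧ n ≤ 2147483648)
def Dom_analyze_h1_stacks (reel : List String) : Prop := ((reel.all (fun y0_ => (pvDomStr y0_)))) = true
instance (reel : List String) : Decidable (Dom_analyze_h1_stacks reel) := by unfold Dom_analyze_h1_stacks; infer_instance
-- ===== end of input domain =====

-- B replaces A's reset-accumulator loop by a run-length decomposition (max over H1 run lengths, default 0); objective: idiomatic.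

-- ===== PORT A =====
-- the for-loop over (max_stack, current_stack)
def pvAGo (reel : List String) (max_stack current_stack : Int) : Int :=
  match reel with
  | [] => max_stack
  | symbol :: rest =>
      if symbol = "H1" then
        pvAGo rest (max max_stack (current_stack + 1)) (current_stack + 1)
      else
        pvAGo rest max_stack 0

def analyze_h1_stacks (reel : List String) : Int := pvAGo reel 0 0

-- ===== PORT B =====
-- inner while loop of _runs: count of leading symbols equal to x, and the remainder
def pvTakeRun (x : String) (reel : List String) : Int × List String :=
  match reel with
  | [] => (0, [])
  | y :: ys =>
      if y = x then
        let (n, r) := pvTakeRun x ys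
        (n + 1, r)
      else (0, y :: ys)

theorem pvTakeRun_len (x : String) (reel : List String) :
    (pvTakeRun x reel).2.length ≤ reel.length := by
  induction reel with
  | nil => simp [pvTakeRun]
  | cons y ys ih =>
      simp only [pvTakeRun]
      split
      · simpa using le_trans ih (Nat.le_succ _)
      · simp

-- the run decomposition produced by _runs
def pvRuns (reel : List String) : List (String × Int) :=
  match reel with
  | [] => []
  | x :: xs =>
      let p := pvTakeRun x xs
      (x, p.1 + 1) :: pvRuns p.2
termination_by reel.length
decreasing_by
  simpa using Nat.lt_succ_of_le (pvTakeRun_len x xs)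

-- max over the H1 run lengths, default 0 (the Python generator + max(..., default=0))
def analyze_h1_stacks_alt (reel : List String) : Int :=
  ((pvRuns reel).filterMap (fun p => if p.1 = "H1" then some p.2 else none)).foldl max 0

-- ===== PRECONDITION & SPEC =====
def Spec_analyze_h1_stacks (reel : List String) (out : Int) : Prop := out = analyze_h1_stacks_alt reel
instance (reel : List String) (out : Int) : Decidable (Spec_analyze_h1_stacks reel out) := by unfold Spec_analyze_h1_stacks; infer_instance

-- ===== CLAIM (what is proved, stated in full; the proofs are below) =====
def Claim_equal_analyze_h1_stacks : Prop := ∀ (reel : List String), Dom_analyze_h1_stacks reel → Spec_analyze_h1_stacks reel (analyze_h1_stacks reel)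

-- ===== LEMMAS AND PROOFS =====

-- takeRun leaves a remainder that does not start with x
theorem pvTakeRun_rest (x : String) (reel : List String) :
    (pvTakeRun x reel).2 = [] ∨ ∃ y ys, (pvTakeRun x reel).2 = y :: ys ∧ y ≠ x := by
  induction reel with
  | nil => left; simp [pvTakeRun]
  | cons y ys ih =>
      simp only [pvTakeRun]
      split
      · simpa using ih
      · right; exact ⟨y, ys, by simp_all⟩

theorem pvTakeRun_nonneg (x : String) (reel : List String) : 0 ≤ (pvTakeRun x reel).1 := by
  induction reel with
  | nil => simp [pvTakeRun]
  | cons y ys ih =>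
      simp only [pvTakeRun]
      split
      · rcases hq : pvTakeRun x ys with ⟨n, r⟩
        simp [hq] at ih ⊢
        omega
      · simp

-- one unfolding step of A's loop
theorem pvAGo_step (s : String) (l : List String) (m c : Int) :
    pvAGo (s :: l) m c = if s = "H1" then pvAGo l (max m (c + 1)) (c + 1) else pvAGo l m 0 := rfl

-- A's loop over the leading run of x, with c the incoming current_stack
theorem pvAGo_run (x : String) (reel : List String) (m c : Int) :
    pvAGo (x :: reel) m c =
      (if x = "H1" then
        pvAGo (pvTakeRun x reel).2 (max m (c + (pvTakeRun x reel).1 + 1)) (c + (pvTakeRun x reel).1 + 1)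
      else pvAGo (pvTakeRun x reel).2 m 0) := by
  induction reel generalizing m c with
  | nil => simp [pvAGo, pvTakeRun]
  | cons y ys ih =>
      by_cases hyx : y = x
      · subst hyx
        have ht : pvTakeRun y (y :: ys) = ((pvTakeRun y ys).1 + 1, (pvTakeRun y ys).2) := by
          simp [pvTakeRun]
        rw [ht, pvAGo_step]
        by_cases hx : y = "H1"
        · have hnn := pvTakeRun_nonneg y ys
          rw [if_pos hx, if_pos hx, ih, if_pos hx]
          have h1 : c + 1 + (pvTakeRun y ys).1 + 1 = c + ((pvTakeRun y ys).1 + 1) + 1 := by ring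
          rw [h1, max_assoc,
              max_eq_right (by omega : (c + 1 : Int) ≤ c + ((pvTakeRun y ys).1 + 1) + 1)]
        · rw [if_neg hx, if_neg hx, ih, if_neg hx]
      · have ht : pvTakeRun x (y :: ys) = (0, y :: ys) := by simp [pvTakeRun, hyx]
        rw [ht, pvAGo_step]
        norm_num

-- the incoming current_stack is irrelevant when the list does not start with "H1"
theorem pvAGo_c_irrel (reel : List String) (m c c' : Int)
    (h : reel = [] ∨ ∃ y ys, reel = y :: ys ∧ y ≠ "H1") :
    pvAGo reel m c = pvAGo reel m c' := by
  rcases h with h | ⟨y, ys, h, hy⟩ <;> subst h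
  · rfl
  · simp [pvAGo, hy]

-- main invariant: A's loop started at current_stack 0 computes B's fold over the runs
theorem pvAGo_eq_runs (reel : List String) (m : Int) :
    pvAGo reel m 0 =
      ((pvRuns reel).filterMap (fun p => if p.1 = "H1" then some p.2 else none)).foldl max m := by
  induction hn : reel.length using Nat.strong_induction_on generalizing reel m with
  | _ n ih =>
    match reel with
    | [] => simp [pvAGo, pvRuns]
    | x :: xs =>
      have hle := pvTakeRun_len x xs
      have hlt : (pvTakeRun x xs).2.length < n := by
        subst hn; simpa using Nat.lt_succ_of_le hle
      rw [pvAGo_run]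
      by_cases hx : x = "H1"
      · subst hx
        rw [if_pos rfl,
            pvAGo_c_irrel _ _ _ 0 (by simpa using pvTakeRun_rest "H1" xs),
            ih _ hlt _ _ rfl]
        have h1 : (0 : Int) + (pvTakeRun "H1" xs).1 + 1 = (pvTakeRun "H1" xs).1 + 1 := by ring
        rw [h1]
        simp [pvRuns, List.foldl_cons]
      · rw [if_neg hx, ih _ hlt _ _ rfl]
        simp [pvRuns, hx]

-- ===== VERDICT (by name: the statement is the Claim_ definition above) =====
theorem analyze_h1_stacks_spec : Claim_equal_analyze_h1_stacks := by
  intro reel _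
  unfold Spec_analyze_h1_stacks analyze_h1_stacks analyze_h1_stacks_alt
  exact pvAGo_eq_runs reel 0
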